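-- pv_equiv track=rewrite | github.com/Hazoom/covid19 | src/nlp/common_sentence_splitter.py | _find_shared_start
-- ===== SOURCE A (Python) =====
-- def _find_shared_start(token_text, sentence):
--     shared_chars = 0
--     max_shared_chars = 0
--     while shared_chars < len(token_text):
--         if sentence.startswith(token_text[len(token_text)-shared_chars:]):
--             max_shared_chars = shared_chars
--         shared_chars += 1
--
--     return max_shared_chars
-- ===== SOURCE B (Python) =====
-- def _find_shared_start(token_text, sentence):
--     n = len(token_text)
--     if n == 0:
--         return 0
--     s = sentence + "\x00" + token_text
--     pi = [0]
--     for i in range(1, len(s)):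
--         k = pi[i - 1]
--         while k and s[i] != s[k]:
--             k = pi[k - 1]
--         if s[i] == s[k]:
--             k += 1
--         pi.append(k)
--     v = pi[-1]
--     while v >= n:
--         v = pi[v - 1]
--     return v
-- ===== Notes on version B (the rewrite author's own statement) =====
-- stated objective: faster
-- what changed: A tests every overlap length with sentence.startswith on a token suffix (O(n*m)); B builds the KMP prefix-function of sentence + '\x00' + token_text in one linear pass and reads the longest suffix-of-token/prefix-of-sentence overlap off its last entry, stepping down the failure chain to keep it below len(token_text).
import Mathlib
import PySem

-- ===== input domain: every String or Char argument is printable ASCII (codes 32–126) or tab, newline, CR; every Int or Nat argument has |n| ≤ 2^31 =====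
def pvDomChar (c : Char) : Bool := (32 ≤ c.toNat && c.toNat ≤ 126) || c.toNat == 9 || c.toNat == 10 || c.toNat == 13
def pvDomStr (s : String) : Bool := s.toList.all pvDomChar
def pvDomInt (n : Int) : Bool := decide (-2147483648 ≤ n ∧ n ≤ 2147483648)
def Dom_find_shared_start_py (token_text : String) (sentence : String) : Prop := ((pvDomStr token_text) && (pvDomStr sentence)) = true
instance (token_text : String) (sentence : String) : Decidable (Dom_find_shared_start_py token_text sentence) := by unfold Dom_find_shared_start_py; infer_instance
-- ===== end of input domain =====

-- B replaces A's per-length startswith scan by a single KMP prefix-function pass over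
-- sentence + '\x00' + token_text, reading the answer off the failure chain; objective: faster.

-- ===== PORT A =====
-- while shared_chars < len(token_text): if sentence.startswith(token_text[len-shared:]): max := shared; shared += 1
def pvA_loop (tok sen : List Char) (shared maxShared : Int) : Int :=
  if 0 < (tok.length : Int) - shared then
    pvA_loop tok sen (shared + 1)
      (if PySem.Chars.startswith sen (PySem.List.slice tok (some ((tok.length : Int) - shared)) none)
       then shared else maxShared)
  else maxShared
termination_by ((tok.length : Int) - shared).toNat
decreasing_by omega

def find_shared_start_py (token_text : String) (sentence : String) : Int :=
  pvA_loop token_text.toList sentence.toList 0 0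

-- ===== PORT B =====
-- Source B: KMP prefix function of s = sentence + "\x00" + token_text; answer = last entry,
-- stepped down the failure chain while it is >= len(token_text).
def pvNUL : Char := Char.ofNat 0

-- inner while loop: while k and s[i] != s[k]: k = pi[k-1]
-- (fuel is a totality guard only: the failure chain strictly decreases, so fuel = k suffices)
def pvKmpFall (pi : List Nat) (s : List Char) (ci : Char) : Nat → Nat → Nat
  | _, 0 => 0
  | 0, k + 1 => k + 1
  | fuel + 1, k + 1 =>
    if ci ≠ s.getD (k + 1) 'A' then pvKmpFall pi s ci fuel (pi.getD k 0)
    else k + 1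

-- body of: k = pi[i-1]; while ...; if s[i] == s[k]: k += 1
def pvKmpEntry (s : List Char) (pi : List Nat) (i : Nat) : Nat :=
  let k0 := pi.getD (i - 1) 0
  let k := pvKmpFall pi s (s.getD i 'A') k0 k0
  if s.getD i 'A' = s.getD k 'A' then k + 1 else k

-- pi = [0]; for i in range(1, len(s)): pi.append(<entry>)
def pvKmpPis (s : List Char) : List Nat :=
  (List.range' 1 (s.length - 1)).foldl (fun pi i => pi ++ [pvKmpEntry s pi i]) [0]

-- v = pi[-1]; while v >= n: v = pi[v-1]   (fuel is a totality guard: v strictly decreases)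
def pvCap (pi : List Nat) (n : Nat) : Nat → Nat → Nat
  | 0, v => v
  | fuel + 1, v => if n ≤ v then pvCap pi n fuel (pi.getD (v - 1) 0) else v

def find_shared_start_py_alt (token_text : String) (sentence : String) : Int :=
  let tok := token_text.toList
  let n := tok.length
  if n = 0 then 0
  else
    let s := sentence.toList ++ [pvNUL] ++ tok
    let pi := pvKmpPis s
    let v := pi.getD (s.length - 1) 0
    ((pvCap pi n (v + 1) v : Nat) : Int)

-- ===== PRECONDITION & SPEC =====
def Spec_find_shared_start_py (token_text : String) (sentence : String) (out : Int) : Prop := out = find_shared_start_py_alt token_text sentence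
instance (token_text : String) (sentence : String) (out : Int) : Decidable (Spec_find_shared_start_py token_text sentence out) := by unfold Spec_find_shared_start_py; infer_instance

-- ===== CLAIM (what is proved, stated in full; the proofs are below) =====
def Claim_equal_find_shared_start_py : Prop := ∀ (token_text : String) (sentence : String), Dom_find_shared_start_py token_text sentence → Spec_find_shared_start_py token_text sentence (find_shared_start_py token_text sentence)

-- ===== LEMMAS AND PROOFS =====

-- P j: sentence starts with the suffix of tok of length j (A's test at shared = j)
def pvP (tok sen : List Char) (j : Nat) : Bool := decide (tok.drop (tok.length - j) <+: sen)

-- the prefix-function value for the prefix of s of length i (the longest proper border)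
def pvFG (s : List Char) (i : Nat) : Nat :=
  Nat.findGreatest (fun k => s.take k <:+ s.take i) (i - 1)

-- ---------- A-side characterisation ----------

theorem pvA_loop_char (tok sen : List Char) (i m : Nat) (hi : i ≤ tok.length) :
    pvA_loop tok sen (i : Int) (m : Int) =
      (match (List.range' i (tok.length - i)).reverse.find? (pvP tok sen) with
        | some j => (j : Int) | none => (m : Int)) := by
  induction' hn : tok.length - i with d ih generalizing i m
  · rw [pvA_loop, if_neg (by push_cast; omega)]
    simp
  · rw [pvA_loop, if_pos (by push_cast; omega)]
    have hlt : i < tok.length := by omega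
    have hslice : PySem.List.slice tok (some ((tok.length : Int) - (i : Int))) none
        = tok.drop (tok.length - i) := by
      rw [PySem.List.slice_from tok (by push_cast; omega)]
      congr 1; omega
    have hcond : PySem.Chars.startswith sen
        (PySem.List.slice tok (some ((tok.length : Int) - (i : Int))) none) = pvP tok sen i := by
      rw [hslice, pvP]
      cases h : PySem.Chars.startswith sen (tok.drop (tok.length - i))
      · symm; rw [decide_eq_false_iff_not]
        intro hp
        rw [(PySem.Chars.startswith_iff _ _).2 hp] at h
        cases h
      · exact (decide_eq_true ((PySem.Chars.startswith_iff _ _).1 h)).symm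
    have hrange : List.range' i (d + 1) = i :: List.range' (i + 1) d := List.range'_succ
    have step : ((i : Int) + 1) = (((i + 1 : Nat)) : Int) := by push_cast; ring
    rw [hcond, hrange]
    simp only [List.reverse_cons, List.find?_append]
    by_cases hp : pvP tok sen i = true
    · rw [if_pos hp, step, ih (i + 1) i (by omega) (by omega)]
      cases hfind : (List.range' (i + 1) d).reverse.find? (pvP tok sen) with
      | some j => simp [hfind]
      | none => simp [hfind, hp]
    · rw [if_neg hp, step, ih (i + 1) m (by omega) (by omega)]
      cases hfind : (List.range' (i + 1) d).reverse.find? (pvP tok sen) with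
      | some j => simp [hfind]
      | none =>
        simp only [hfind, Option.none_or]
        simp [List.find?, hp]

theorem pvP_zero (tok sen : List Char) : pvP tok sen 0 = true := by
  simp [pvP]

theorem pvP_false_of_long (tok sen : List Char) (j : Nat) (hjn : j ≤ tok.length)
    (hjm : sen.length < j) : pvP tok sen j = false := by
  rw [pvP]
  simp only [decide_eq_false_iff_not]
  intro h
  have := h.length_le
  rw [List.length_drop] at this
  omega

-- for j ≤ min(n, m), A's test "tok suffix of length j is a prefix of sen" equals
-- "sen.take j is a suffix of tok"
theorem pvPQ (tok sen : List Char) (j : Nat) (hjn : j ≤ tok.length) (hjm : j ≤ sen.length) :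
    pvP tok sen j = true ↔ sen.take j <:+ tok := by
  have hlen_drop : (tok.drop (tok.length - j)).length = j := by
    simp [List.length_drop]; omega
  have hlen_take : (sen.take j).length = j := by simp; omega
  rw [pvP, decide_eq_true_iff]
  constructor
  · intro h
    have heq : tok.drop (tok.length - j) = sen.take j := by
      have := List.prefix_iff_eq_take.1 h
      rw [hlen_drop] at this
      exact this
    exact heq ▸ List.drop_suffix _ _
  · intro hs
    have heq : sen.take j = tok.drop (tok.length - (sen.take j).length) :=
      List.suffix_iff_eq_drop.1 hs
    rw [hlen_take] at heq
    exact heq ▸ List.take_prefix j sen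

-- a downward find? over an initial range equals Nat.findGreatest when the predicate holds at 0
theorem pv_find_rev_eq_findGreatest (p : Nat → Bool) (b : Nat) (h0 : p 0 = true) :
    (List.range' 0 (b + 1)).reverse.find? p = some (Nat.findGreatest (fun k => p k = true) b) := by
  induction b with
  | zero => simp [List.range'_one, List.find?, h0]
  | succ b ih =>
    have hconcat : List.range' 0 (b + 1 + 1) = List.range' 0 (b + 1) ++ [b + 1] := by
      have := @List.range'_concat 1 0 (b + 1)
      simpa using this
    rw [hconcat, Nat.findGreatest_succ]
    simp only [List.reverse_append, List.reverse_singleton, List.singleton_append, List.find?]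
    by_cases hp : p (b + 1) = true
    · simp [hp]
    · simp only [Bool.not_eq_true] at hp
      simp [hp, ih]

theorem pvA_char (tok sen : List Char) (hn : 1 ≤ tok.length) :
    pvA_loop tok sen 0 0 =
      ((Nat.findGreatest (fun k => pvP tok sen k = true) (tok.length - 1) : Nat) : Int) := by
  have h := pvA_loop_char tok sen 0 0 (by omega)
  rw [Nat.cast_zero] at h
  rw [h]
  have hb : tok.length - 0 = (tok.length - 1) + 1 := by omega
  rw [hb, pv_find_rev_eq_findGreatest (pvP tok sen) (tok.length - 1) (pvP_zero tok sen)]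

-- ---------- generic list lemmas ----------

theorem pv_concat_suffix (u w : List Char) (a b : Char) :
    (u ++ [a] <:+ w ++ [b]) ↔ a = b ∧ u <:+ w := by
  constructor
  · intro h
    have h' : a :: u.reverse <+: b :: w.reverse := by
      simpa using List.reverse_prefix.mpr h
    rcases List.cons_prefix_cons.1 h' with ⟨rfl, h2⟩
    exact ⟨rfl, List.reverse_prefix.1 h2⟩
  · rintro ⟨rfl, h⟩
    obtain ⟨x, rfl⟩ := h
    exact ⟨x, by simp⟩

theorem pv_take_succ (s : List Char) (i : Nat) (h : i < s.length) :
    s.take (i + 1) = s.take i ++ [s.getD i 'A'] := by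
  rw [List.take_add_one, List.getElem?_eq_getElem h]
  simp [List.getD, List.getElem?_eq_getElem h]

theorem pv_border_step (s : List Char) (i k : Nat) (hi : i < s.length) (hk : k ≤ i) :
    (s.take (k + 1) <:+ s.take (i + 1)) ↔
      (s.take k <:+ s.take i ∧ s.getD i 'A' = s.getD k 'A') := by
  rw [pv_take_succ s i hi, pv_take_succ s k (lt_of_le_of_lt hk hi), pv_concat_suffix]
  exact ⟨fun ⟨h1, h2⟩ => ⟨h2, h1.symm⟩, fun ⟨h1, h2⟩ => ⟨h2.symm, h1⟩⟩

theorem pv_suffix_of_suffix (u v w : List Char) (hu : u <:+ w) (hv : v <:+ w)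
    (h : u.length ≤ v.length) : u <:+ v := by
  have := List.prefix_of_prefix_length_le (List.reverse_prefix.mpr hu)
    (List.reverse_prefix.mpr hv) (by simpa using h)
  exact List.reverse_prefix.1 this

theorem pv_findGreatest_congr (p q : Nat → Prop) [DecidablePred p] [DecidablePred q] (b : Nat)
    (h : ∀ k, k ≤ b → (p k ↔ q k)) : Nat.findGreatest p b = Nat.findGreatest q b := by
  induction b with
  | zero => rfl
  | succ b ih =>
    rw [Nat.findGreatest_succ, Nat.findGreatest_succ,
      ih (fun k hk => h k (Nat.le_succ_of_le hk))]
    by_cases hq : q (b + 1)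
    · rw [if_pos ((h (b + 1) le_rfl).2 hq), if_pos hq]
    · rw [if_neg (fun hp => hq ((h (b + 1) le_rfl).1 hp)), if_neg hq]

theorem pv_getD_append_left (l₁ l₂ : List Nat) (j : Nat) (h : j < l₁.length) :
    (l₁ ++ l₂).getD j 0 = l₁.getD j 0 := by
  induction l₁ generalizing j with
  | nil => simp at h
  | cons a l ih =>
    cases j with
    | zero => rfl
    | succ j =>
      simp only [List.cons_append, List.getD_cons_succ]
      exact ih j (by simpa using h)

theorem pv_getD_append_self (l₁ : List Nat) (x : Nat) :
    (l₁ ++ [x]).getD l₁.length 0 = x := by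
  induction l₁ with
  | nil => rfl
  | cons a l ih =>
    simp only [List.cons_append, List.length_cons, List.getD_cons_succ]
    exact ih

-- ---------- prefix-function facts ----------

theorem pvFG_le (s : List Char) (i : Nat) : pvFG s i ≤ i - 1 :=
  Nat.findGreatest_le _

theorem pv_take_zero_suffix (l l' : List Char) : l.take 0 <:+ l' := ⟨l', by simp⟩

theorem pvFG_suffix (s : List Char) (i : Nat) : s.take (pvFG s i) <:+ s.take i := by
  unfold pvFG
  exact Nat.findGreatest_spec (P := fun k => s.take k <:+ s.take i) (Nat.zero_le _)
    (pv_take_zero_suffix s (s.take i))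

theorem pv_le_pvFG (s : List Char) (i j : Nat) (hj : j ≤ i - 1) (h : s.take j <:+ s.take i) :
    j ≤ pvFG s i :=
  Nat.le_findGreatest hj h

theorem pvKmpFall_zero (pi : List Nat) (s : List Char) (ci : Char) (fuel : Nat) :
    pvKmpFall pi s ci fuel 0 = 0 := by cases fuel <;> rfl

theorem pvKmpFall_succ (pi : List Nat) (s : List Char) (ci : Char) (fuel k : Nat) :
    pvKmpFall pi s ci (fuel + 1) (k + 1) =
      if ci ≠ s.getD (k + 1) 'A' then pvKmpFall pi s ci fuel (pi.getD k 0) else k + 1 := rfl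

theorem pvKmpEntry_eq (s : List Char) (pi : List Nat) (i : Nat) :
    pvKmpEntry s pi i =
      if s.getD i 'A' =
          s.getD (pvKmpFall pi s (s.getD i 'A') (pi.getD (i - 1) 0) (pi.getD (i - 1) 0)) 'A'
      then pvKmpFall pi s (s.getD i 'A') (pi.getD (i - 1) 0) (pi.getD (i - 1) 0) + 1
      else pvKmpFall pi s (s.getD i 'A') (pi.getD (i - 1) 0) (pi.getD (i - 1) 0) := rfl

theorem pv_fall_correct (s : List Char) (pi : List Nat) (i : Nat)
    (Hpi : ∀ j, j < i → pi.getD j 0 = pvFG s (j + 1)) (c : Char) :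
    ∀ fuel k, k ≤ fuel → k < i → s.take k <:+ s.take i →
      (pvKmpFall pi s c fuel k ≤ k ∧ pvKmpFall pi s c fuel k < i ∧
       s.take (pvKmpFall pi s c fuel k) <:+ s.take i ∧
       (pvKmpFall pi s c fuel k = 0 ∨ c = s.getD (pvKmpFall pi s c fuel k) 'A') ∧
       ∀ j, j ≤ k → s.take j <:+ s.take i → c = s.getD j 'A' →
         j ≤ pvKmpFall pi s c fuel k) := by
  intro fuel
  induction fuel with
  | zero =>
    intro k hk hki hsuf
    have hk0 : k = 0 := by omega
    subst hk0
    rw [pvKmpFall_zero]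
    exact ⟨le_rfl, hki, by simp, Or.inl rfl, fun j hj _ _ => hj⟩
  | succ fuel ih =>
    intro k hk hki hsuf
    cases k with
    | zero =>
      rw [pvKmpFall_zero]
      exact ⟨le_rfl, hki, by simp, Or.inl rfl, fun j hj _ _ => hj⟩
    | succ k' =>
      rw [pvKmpFall_succ]
      by_cases hc : c = s.getD (k' + 1) 'A'
      · rw [if_neg (by simpa using hc)]
        exact ⟨le_rfl, hki, hsuf, Or.inr hc, fun j hj _ _ => hj⟩
      · rw [if_pos hc]
        have hk'i : k' < i := by omega
        have hpik : pi.getD k' 0 = pvFG s (k' + 1) := Hpi k' hk'i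
        have hk2le : pi.getD k' 0 ≤ k' := by
          rw [hpik]
          simpa using pvFG_le s (k' + 1)
        have hk2fuel : pi.getD k' 0 ≤ fuel := by omega
        have hk2i : pi.getD k' 0 < i := by omega
        have hk2suf : s.take (pi.getD k' 0) <:+ s.take i := by
          rw [hpik]
          exact (pvFG_suffix s (k' + 1)).trans hsuf
        obtain ⟨h1, h2, h3, h4, h5⟩ := ih (pi.getD k' 0) hk2fuel hk2i hk2suf
        refine ⟨by omega, h2, h3, h4, ?_⟩
        intro j hj hjsuf hjc
        by_cases hjk2 : j ≤ pi.getD k' 0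
        · exact h5 j hjk2 hjsuf hjc
        · exfalso
          push_neg at hjk2
          have hjne : j ≠ k' + 1 := by
            intro h
            rw [h] at hjc
            exact hc hjc
          have hjk' : j ≤ k' := by omega
          -- j is then a border of the prefix of length k'+1, so j ≤ pvFG s (k'+1)
          have hlen : (s.take j).length ≤ (s.take (k' + 1)).length := by
            simp only [List.length_take]
            omega
          have hjsuf' : s.take j <:+ s.take (k' + 1) :=
            pv_suffix_of_suffix _ _ _ hjsuf hsuf hlen
          have := pv_le_pvFG s (k' + 1) j (by omega) hjsuf'
          rw [← hpik] at this
          omega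

theorem pv_entry_correct (s : List Char) (pi : List Nat) (i : Nat) (hi1 : 1 ≤ i)
    (hi : i < s.length)
    (Hpi : ∀ j, j < i → pi.getD j 0 = pvFG s (j + 1)) :
    pvKmpEntry s pi i = pvFG s (i + 1) := by
  have hk0 : pi.getD (i - 1) 0 = pvFG s i := by
    have := Hpi (i - 1) (by omega)
    rwa [show i - 1 + 1 = i by omega] at this
  rw [pvKmpEntry_eq, hk0]
  have hk0i : pvFG s i < i := by
    have := pvFG_le s i
    omega
  have hk0suf : s.take (pvFG s i) <:+ s.take i := pvFG_suffix s i
  obtain ⟨h1, h2, h3, h4, h5⟩ :=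
    pv_fall_correct s pi i Hpi (s.getD i 'A') (pvFG s i) (pvFG s i) le_rfl hk0i hk0suf
  set c := s.getD i 'A' with hcdef
  set r := pvKmpFall pi s c (pvFG s i) (pvFG s i) with hrdef
  -- every border j+1 of the prefix of length i+1 yields j ≤ r
  have hupper : ∀ j, j + 1 ≤ i → s.take (j + 1) <:+ s.take (i + 1) → j ≤ r := by
    intro j hj hsufj
    obtain ⟨hb1, hb2⟩ := (pv_border_step s i j hi (by omega)).1 hsufj
    have hjk0 : j ≤ pvFG s i := pv_le_pvFG s i j (by omega) hb1
    rw [← hcdef] at hb2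
    exact h5 j hjk0 hb1 hb2
  by_cases hc : c = s.getD r 'A'
  · rw [if_pos hc]
    have hmem : s.take (r + 1) <:+ s.take (i + 1) := by
      refine (pv_border_step s i r hi (by omega)).2 ⟨h3, ?_⟩
      rw [← hcdef]
      exact hc
    apply le_antisymm
    · exact pv_le_pvFG s (i + 1) (r + 1) (by omega) hmem
    · have hFsuf : s.take (pvFG s (i + 1)) <:+ s.take (i + 1) := pvFG_suffix s (i + 1)
      have hFle : pvFG s (i + 1) ≤ i := by
        have := pvFG_le s (i + 1)
        omega
      rcases Nat.eq_zero_or_pos (pvFG s (i + 1)) with h0 | hpos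
      · omega
      · obtain ⟨F', hF'⟩ : ∃ F', pvFG s (i + 1) = F' + 1 := ⟨pvFG s (i + 1) - 1, by omega⟩
        rw [hF'] at hFsuf
        have := hupper F' (by omega) hFsuf
        omega
  · rw [if_neg hc]
    have hr0 : r = 0 := by
      rcases h4 with h | h
      · exact h
      · exact absurd h hc
    rw [hr0]
    symm
    unfold pvFG
    rw [Nat.findGreatest_eq_zero_iff]
    intro j hj0 hji hjsuf
    obtain ⟨j', rfl⟩ : ∃ j', j = j' + 1 := ⟨j - 1, by omega⟩
    have hj'r : j' ≤ r := hupper j' (by omega) hjsuf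
    have hj'0 : j' = 0 := by omega
    subst hj'0
    obtain ⟨-, hb2⟩ := (pv_border_step s i 0 hi (by omega)).1 hjsuf
    rw [← hcdef] at hb2
    rw [hr0] at hc
    exact hc hb2

-- partial fold of the pi-building loop
def pvPisAux (s : List Char) (t : Nat) : List Nat :=
  (List.range' 1 t).foldl (fun pi i => pi ++ [pvKmpEntry s pi i]) [0]

theorem pvPisAux_succ (s : List Char) (t : Nat) :
    pvPisAux s (t + 1) = pvPisAux s t ++ [pvKmpEntry s (pvPisAux s t) (t + 1)] := by
  unfold pvPisAux
  have h : List.range' 1 (t + 1) = List.range' 1 t ++ [t + 1] := by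
    have := @List.range'_concat 1 1 t
    simpa [Nat.add_comm] using this
  rw [h, List.foldl_append]
  rfl

theorem pvPisAux_correct (s : List Char) (t : Nat) (ht : t ≤ s.length - 1)
    (hs : 1 ≤ s.length) :
    (pvPisAux s t).length = t + 1 ∧
      ∀ j, j ≤ t → (pvPisAux s t).getD j 0 = pvFG s (j + 1) := by
  induction t with
  | zero =>
    refine ⟨rfl, ?_⟩
    intro j hj
    have hj0 : j = 0 := by omega
    subst hj0
    simp [pvPisAux, pvFG, List.getD]
  | succ t ih =>
    obtain ⟨ihlen, ihval⟩ := ih (by omega)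
    rw [pvPisAux_succ]
    constructor
    · simp [ihlen]
    · intro j hj
      by_cases hjt : j ≤ t
      · rw [pv_getD_append_left _ _ j (by omega)]
        exact ihval j hjt
      · have hj' : j = t + 1 := by omega
        subst hj'
        rw [← ihlen, pv_getD_append_self]
        rw [ihlen]
        exact pv_entry_correct s (pvPisAux s t) (t + 1) (by omega) (by omega)
          (fun j hji => ihval j (by omega))

-- ---------- borders of the combined string ----------

theorem pv_s_take (sen tok : List Char) (j : Nat) (hj : j ≤ sen.length) :
    (sen ++ [pvNUL] ++ tok).take j = sen.take j := by
  rw [List.take_append_of_le_length (by simp; omega), List.take_append_of_le_length hj]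

-- a NUL-free/NUL/rest decomposition of a list is unique
theorem pv_nul_split (x : List Char) : ∀ (x' y y' : List Char), pvNUL ∉ x → pvNUL ∉ x' →
    x ++ [pvNUL] ++ y = x' ++ [pvNUL] ++ y' → x = x' ∧ y = y' := by
  induction x with
  | nil =>
    intro x' y y' _ hx' h
    cases x' with
    | nil => exact ⟨rfl, by simpa using h⟩
    | cons b x'' =>
      exfalso
      simp only [List.nil_append, List.cons_append, List.cons.injEq] at h
      exact hx' (h.1 ▸ List.mem_cons_self)
  | cons a x ih =>
    intro x' y y' hx hx' h
    cases x' with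
    | nil =>
      exfalso
      simp only [List.nil_append, List.cons_append, List.cons.injEq] at h
      exact hx (h.1.symm ▸ List.mem_cons_self)
    | cons b x'' =>
      simp only [List.cons_append, List.cons.injEq] at h
      obtain ⟨rfl, h2⟩ := h
      obtain ⟨hxeq, hyeq⟩ := ih x'' y y'
        (fun hm => hx (List.mem_cons_of_mem _ hm))
        (fun hm => hx' (List.mem_cons_of_mem _ hm))
        (by simpa using h2)
      exact ⟨by rw [hxeq], hyeq⟩

theorem pv_border_full (sen tok : List Char) (Hsen : pvNUL ∉ sen) (Htok : pvNUL ∉ tok)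
    (j : Nat) (hj : j ≤ sen.length + tok.length) :
    ((sen ++ [pvNUL] ++ tok).take j <:+ (sen ++ [pvNUL] ++ tok)) ↔
      (j ≤ min tok.length sen.length ∧ sen.take j <:+ tok) := by
  have hsen0 : sen.count pvNUL = 0 := List.count_eq_zero.2 Hsen
  have htok0 : tok.count pvNUL = 0 := List.count_eq_zero.2 Htok
  have hone : ([pvNUL] : List Char).count pvNUL = 1 := by simp
  constructor
  · intro h
    obtain ⟨u, hu⟩ := h
    -- j ≤ sen.length
    have hjm : j ≤ sen.length := by
      by_contra hjm
      push_neg at hjm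
      have htake : (sen ++ [pvNUL] ++ tok).take j
          = (sen ++ [pvNUL]) ++ tok.take (j - (sen ++ [pvNUL]).length) := by
        rw [List.take_append, List.take_of_length_le (by simp; omega)]
      rw [htake] at hu
      have htk0 : (tok.take (j - (sen ++ [pvNUL]).length)).count pvNUL = 0 :=
        List.count_eq_zero.2 (fun hm => Htok (List.take_subset _ _ hm))
      have hc := congrArg (fun l => l.count pvNUL) hu
      simp only [List.count_append] at hc
      have hcu : u.count pvNUL = 0 := by omega
      have hu' : (u ++ sen) ++ [pvNUL] ++ tok.take (j - (sen ++ [pvNUL]).length)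
          = sen ++ [pvNUL] ++ tok := by
        simpa [List.append_assoc] using hu
      obtain ⟨hx, hy⟩ := pv_nul_split (u ++ sen) sen
        (tok.take (j - (sen ++ [pvNUL]).length)) tok
        (fun hm => (List.mem_append.1 hm).elim
          (fun hh => absurd hh (List.count_eq_zero.1 hcu)) Hsen)
        Hsen hu'
      have hlen := congrArg List.length hy
      simp at hlen
      omega
    -- j ≤ tok.length
    have hjn : j ≤ tok.length := by
      by_contra hjn
      push_neg at hjn
      have htake : (sen ++ [pvNUL] ++ tok).take j = sen.take j := pv_s_take sen tok j hjm
      have hcnt : ((sen ++ [pvNUL] ++ tok).take j).count pvNUL = 0 := by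
        rw [htake]
        exact List.count_eq_zero.2 (fun hm => Hsen (List.take_subset _ _ hm))
      have hc := congrArg (fun l => l.count pvNUL) hu
      simp only [List.count_append] at hc
      have hcu : u.count pvNUL = 1 := by omega
      have hlenu := congrArg List.length hu
      simp only [List.length_append, List.length_take, List.length_cons,
        List.length_nil] at hlenu
      have hupre : (sen ++ [pvNUL] ++ tok).take u.length = u := by
        rw [← hu, List.take_left]
      have hul : u.length ≤ sen.length := by omega
      rw [pv_s_take sen tok _ hul] at hupre
      have hmem : pvNUL ∈ u := by
        by_contra hnm
        rw [List.count_eq_zero.2 hnm] at hcu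
        exact absurd hcu (by decide)
      rw [← hupre] at hmem
      exact Hsen (List.take_subset _ _ hmem)
    refine ⟨by omega, ?_⟩
    have hsen_suf : sen.take j <:+ (sen ++ [pvNUL] ++ tok) := by
      rw [← pv_s_take sen tok j hjm]
      exact ⟨u, hu⟩
    have htok_suf : tok <:+ (sen ++ [pvNUL] ++ tok) := ⟨sen ++ [pvNUL], by simp⟩
    exact pv_suffix_of_suffix _ _ _ hsen_suf htok_suf (by simp [List.length_take]; omega)
  · rintro ⟨hjmin, hsuf⟩
    rw [pv_s_take sen tok j (by omega)]
    exact hsuf.trans ⟨sen ++ [pvNUL], by simp⟩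

-- ---------- putting B together ----------

theorem pvCap_step (pi : List Nat) (n fuel v : Nat) :
    pvCap pi n (fuel + 1) v = if n ≤ v then pvCap pi n fuel (pi.getD (v - 1) 0) else v := rfl

theorem pv_B_char (tok sen s : List Char) (hsdef : s = sen ++ [pvNUL] ++ tok)
    (Hsen : pvNUL ∉ sen) (Htok : pvNUL ∉ tok) (hn : 1 ≤ tok.length) :
    pvCap (pvKmpPis s) tok.length ((pvKmpPis s).getD (s.length - 1) 0 + 1)
        ((pvKmpPis s).getD (s.length - 1) 0) =
      Nat.findGreatest (fun k => pvP tok sen k = true) (tok.length - 1) := by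
  have hL : s.length = sen.length + 1 + tok.length := by rw [hsdef]; simp; omega
  have hs1 : 1 ≤ s.length := by omega
  set pi := pvKmpPis s with hpidef
  have hpis : pi = pvPisAux s (s.length - 1) := hpidef
  obtain ⟨hlen, hval⟩ := pvPisAux_correct s (s.length - 1) le_rfl hs1
  set v := pi.getD (s.length - 1) 0 with hvdef
  have hv : v = pvFG s s.length := by
    rw [hvdef, hpis, hval (s.length - 1) le_rfl, show s.length - 1 + 1 = s.length by omega]
  -- characterise v as the best overlap
  have hvchar : v = Nat.findGreatest (fun k => sen.take k <:+ tok)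
      (min tok.length sen.length) := by
    apply le_antisymm
    · have hvsuf : s.take v <:+ s := by
        rw [hv]
        have h := pvFG_suffix s s.length
        rwa [List.take_length] at h
      have hvle : v ≤ s.length - 1 := by rw [hv]; exact pvFG_le s s.length
      rw [hsdef] at hvsuf
      obtain ⟨h1, h2⟩ := (pv_border_full sen tok Hsen Htok v (by omega)).1 hvsuf
      exact Nat.le_findGreatest h1 h2
    · set g := Nat.findGreatest (fun k => sen.take k <:+ tok)
        (min tok.length sen.length) with hg
      have hgsuf : sen.take g <:+ tok := by
        rw [hg]
        exact Nat.findGreatest_spec (P := fun k => sen.take k <:+ tok) (Nat.zero_le _)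
          (pv_take_zero_suffix sen tok)
      have hgle : g ≤ min tok.length sen.length := by
        rw [hg]
        exact Nat.findGreatest_le _
      have hsg : s.take g <:+ s := by
        rw [hsdef]
        exact (pv_border_full sen tok Hsen Htok g (by omega)).2 ⟨hgle, hgsuf⟩
      have hsg' : s.take g <:+ s.take s.length := by
        rw [List.take_length]
        exact hsg
      have := pv_le_pvFG s s.length g (by omega) hsg'
      omega
  by_cases hF : v < tok.length
  · rw [pvCap_step, if_neg (by omega)]
    apply le_antisymm
    · have hvsuf : sen.take v <:+ tok := by
        rw [hvchar]
        exact Nat.findGreatest_spec (P := fun k => sen.take k <:+ tok) (Nat.zero_le _)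
          (pv_take_zero_suffix sen tok)
      have hvle : v ≤ min tok.length sen.length := by
        rw [hvchar]
        exact Nat.findGreatest_le _
      have hPv : pvP tok sen v = true := (pvPQ tok sen v (by omega) (by omega)).2 hvsuf
      exact Nat.le_findGreatest (by omega) hPv
    · set T := Nat.findGreatest (fun k => pvP tok sen k = true) (tok.length - 1) with hT
      have hTP : pvP tok sen T = true := by
        rw [hT]
        exact Nat.findGreatest_spec (P := fun k => pvP tok sen k = true) (Nat.zero_le _)
          (pvP_zero tok sen)
      have hTle : T ≤ tok.length - 1 := by
        rw [hT]
        exact Nat.findGreatest_le _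
      have hTm : T ≤ sen.length := by
        by_contra hTm
        push_neg at hTm
        rw [pvP_false_of_long tok sen T (by omega) (by omega)] at hTP
        cases hTP
      have hTsuf : sen.take T <:+ tok := (pvPQ tok sen T (by omega) (by omega)).1 hTP
      rw [hvchar]
      exact Nat.le_findGreatest (by omega) hTsuf
  · -- v = tok.length: the whole token is a prefix of the sentence; step down once
    push_neg at hF
    have hvle : v ≤ min tok.length sen.length := by
      rw [hvchar]
      exact Nat.findGreatest_le _
    have hveq : v = tok.length := by omega
    have hnm : tok.length ≤ sen.length := by omega
    rw [pvCap_step, if_pos (by omega)]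
    have hvsuf : sen.take v <:+ tok := by
      rw [hvchar]
      exact Nat.findGreatest_spec (P := fun k => sen.take k <:+ tok) (Nat.zero_le _)
        (pv_take_zero_suffix sen tok)
    rw [hveq] at hvsuf
    have htokeq : sen.take tok.length = tok :=
      hvsuf.eq_of_length (by simp [List.length_take]; omega)
    have hv2 : pi.getD (v - 1) 0 = pvFG s tok.length := by
      rw [hveq, hpis, hval (tok.length - 1) (by omega),
        show tok.length - 1 + 1 = tok.length by omega]
    rw [hv2]
    have hstake : ∀ k, k ≤ sen.length → s.take k = sen.take k := by
      intro k hk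
      rw [hsdef]
      exact pv_s_take sen tok k hk
    have hstaken : s.take tok.length = tok := by
      rw [hstake tok.length hnm, htokeq]
    have hFGn : pvFG s tok.length
        = Nat.findGreatest (fun k => pvP tok sen k = true) (tok.length - 1) := by
      unfold pvFG
      apply pv_findGreatest_congr
      intro k hk
      rw [hstaken, hstake k (by omega)]
      exact (pvPQ tok sen k (by omega) (by omega)).symm
    have hlt : pvFG s tok.length < tok.length := by
      have := pvFG_le s tok.length
      omega
    obtain ⟨v', hv'⟩ : ∃ v', v = v' + 1 := ⟨v - 1, by omega⟩
    rw [hv', pvCap_step, if_neg (by omega)]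
    exact hFGn

-- pvNUL is outside the printable-ASCII domain
theorem pv_NUL_not_mem (s : String) (h : pvDomStr s = true) : pvNUL ∉ s.toList := by
  intro hmem
  have h' : s.toList.all pvDomChar = true := h
  have := List.all_eq_true.1 h' pvNUL hmem
  exact absurd this (by decide)

theorem pv_alt_eq (token_text sentence : String) :
    find_shared_start_py_alt token_text sentence =
      if token_text.toList.length = 0 then 0
      else ((pvCap (pvKmpPis (sentence.toList ++ [pvNUL] ++ token_text.toList))
              token_text.toList.length
              ((pvKmpPis (sentence.toList ++ [pvNUL] ++ token_text.toList)).getD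
                ((sentence.toList ++ [pvNUL] ++ token_text.toList).length - 1) 0 + 1)
              ((pvKmpPis (sentence.toList ++ [pvNUL] ++ token_text.toList)).getD
                ((sentence.toList ++ [pvNUL] ++ token_text.toList).length - 1) 0) : Nat) :
            Int) := rfl

-- ===== VERDICT (by name: the statement is the Claim_ definition above) =====
theorem find_shared_start_py_spec : Claim_equal_find_shared_start_py := by
  intro token_text sentence hDom
  have hDom' : (pvDomStr token_text && pvDomStr sentence) = true := hDom
  rw [Bool.and_eq_true] at hDom'
  obtain ⟨hDtok, hDsen⟩ := hDom'
  unfold Spec_find_shared_start_py find_shared_start_py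
  rw [pv_alt_eq]
  by_cases hn : token_text.toList.length = 0
  · rw [if_pos hn, pvA_loop, if_neg (by push_cast; omega)]
  · rw [if_neg hn,
      pvA_char token_text.toList sentence.toList (by omega),
      pv_B_char token_text.toList sentence.toList
        (sentence.toList ++ [pvNUL] ++ token_text.toList) rfl
        (pv_NUL_not_mem sentence hDsen) (pv_NUL_not_mem token_text hDtok) (by omega)]
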